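-- pv_equiv track=rewrite | github.com/baltarius/calendrier | calendrier.py | get_recurring_observances
-- ===== SOURCE A (Python) =====
-- def get_recurring_observances(month):
--     """
--     List of recurring days through the years
--
--     Args:
--         month as int for the month (1~12)
--
--     Returns:
--          events as dict for the static events of the year
--     """
--     events = {}
--     fixed = [
--         (2, 14, "Valentine's Day"),
--         (3, 8, "International Women's Day"),
--         (3, 17, "St. Patrick's Day"),
--         (4, 22, "Earth Day"),
--         (5, 1, "International Workers' Day"),
--         (10, 31, "Halloween"),
--         (11, 11, "Remembrance Day"),
--         (12, 24, "Christmas Eve"),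
--         (12, 31, "New Year's Eve"),
--     ]
--     for monthz, day, name in fixed:
--         if monthz == month:
--             events[day] = name
--     return events
-- ===== SOURCE B (Python) =====
-- def get_recurring_observances(month):
--     if month == 2:
--         return {14: "Valentine's Day"}
--     if month == 3:
--         return {8: "International Women's Day", 17: "St. Patrick's Day"}
--     if month == 4:
--         return {22: "Earth Day"}
--     if month == 5:
--         return {1: "International Workers' Day"}
--     if month == 10:
--         return {31: "Halloween"}
--     if month == 11:
--         return {11: "Remembrance Day"}
--     if month == 12:
--         return {24: "Christmas Eve", 31: "New Year's Eve"}
--     return {}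
-- ===== Notes on version B (the rewrite author's own statement) =====
-- stated objective: simpler
-- what changed: Replaces A's filter loop over the flat (month, day, name) list and incremental dict building with a direct branch chain that returns a fresh literal dict for each month with fixed holidays (empty dict otherwise), so no data structure is scanned or accumulated.
import Mathlib
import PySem

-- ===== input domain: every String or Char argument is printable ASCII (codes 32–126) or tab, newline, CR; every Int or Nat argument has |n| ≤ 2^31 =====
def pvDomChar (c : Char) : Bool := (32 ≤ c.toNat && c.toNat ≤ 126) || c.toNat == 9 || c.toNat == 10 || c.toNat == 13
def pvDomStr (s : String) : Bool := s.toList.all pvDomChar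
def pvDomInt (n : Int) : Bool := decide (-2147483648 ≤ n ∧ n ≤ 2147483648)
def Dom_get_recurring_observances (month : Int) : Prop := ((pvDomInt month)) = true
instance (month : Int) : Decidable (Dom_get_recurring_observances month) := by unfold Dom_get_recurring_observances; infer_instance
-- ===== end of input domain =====

-- B replaces A's filter-and-accumulate loop over the flat fixed list by an early-return branch chain with one literal dict per month (simpler).

-- ===== PORT A =====
def get_recurring_observances (month : Int) : List (Int × String) :=
  let fixed : List (Int × Int × String) := [
    (2, 14, "Valentine's Day"),
    (3, 8, "International Women's Day"),
    (3, 17, "St. Patrick's Day"),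
    (4, 22, "Earth Day"),
    (5, 1, "International Workers' Day"),
    (10, 31, "Halloween"),
    (11, 11, "Remembrance Day"),
    (12, 24, "Christmas Eve"),
    (12, 31, "New Year's Eve")]
  (fixed.foldl (fun events t =>
    if t.1 == month then PySem.Dict.insert events t.2.1 t.2.2 else events)
    (PySem.Dict.empty : PySem.Dict Int String)).items

-- ===== PORT B =====
def get_recurring_observances_alt (month : Int) : List (Int × String) :=
  if month == 2 then [(14, "Valentine's Day")]
  else if month == 3 then [(8, "International Women's Day"), (17, "St. Patrick's Day")]
  else if month == 4 then [(22, "Earth Day")]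
  else if month == 5 then [(1, "International Workers' Day")]
  else if month == 10 then [(31, "Halloween")]
  else if month == 11 then [(11, "Remembrance Day")]
  else if month == 12 then [(24, "Christmas Eve"), (31, "New Year's Eve")]
  else []

-- ===== PRECONDITION & SPEC =====
def Spec_get_recurring_observances (month : Int) (out : List (Int × String)) : Prop := out = get_recurring_observances_alt month
instance (month : Int) (out : List (Int × String)) : Decidable (Spec_get_recurring_observances month out) := by unfold Spec_get_recurring_observances; infer_instance

-- ===== CLAIM (what is proved, stated in full; the proofs are below) =====
def Claim_equal_get_recurring_observances : Prop := ∀ (month : Int), Dom_get_recurring_observances month → Spec_get_recurring_observances month (get_recurring_observances month)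

-- ===== LEMMAS AND PROOFS =====

-- ===== VERDICT (by name: the statement is the Claim_ definition above) =====
theorem get_recurring_observances_spec : Claim_equal_get_recurring_observances := by
  intro month _
  unfold Spec_get_recurring_observances
  by_cases h2 : month = 2
  · subst h2; decide
  by_cases h3 : month = 3
  · subst h3; decide
  by_cases h4 : month = 4
  · subst h4; decide
  by_cases h5 : month = 5
  · subst h5; decide
  by_cases h10 : month = 10
  · subst h10; decide
  by_cases h11 : month = 11
  · subst h11; decide
  by_cases h12 : month = 12
  · subst h12; decide
  ·
    have e2 : ((2:Int) == month) = false := by simpa using Ne.symm h2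
    have e3 : ((3:Int) == month) = false := by simpa using Ne.symm h3
    have e4 : ((4:Int) == month) = false := by simpa using Ne.symm h4
    have e5 : ((5:Int) == month) = false := by simpa using Ne.symm h5
    have e10 : ((10:Int) == month) = false := by simpa using Ne.symm h10
    have e11 : ((11:Int) == month) = false := by simpa using Ne.symm h11
    have e12 : ((12:Int) == month) = false := by simpa using Ne.symm h12
    have f2 : (month == (2:Int)) = false := by simpa using h2
    have f3 : (month == (3:Int)) = false := by simpa using h3
    have f4 : (month == (4:Int)) = false := by simpa using h4
    have f5 : (month == (5:Int)) = false := by simpa using h5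
    have f10 : (month == (10:Int)) = false := by simpa using h10
    have f11 : (month == (11:Int)) = false := by simpa using h11
    have f12 : (month == (12:Int)) = false := by simpa using h12
    simp [get_recurring_observances, get_recurring_observances_alt,
      PySem.Dict.empty, List.foldl,
      e2, e3, e4, e5, e10, e11, e12, f2, f3, f4, f5, f10, f11, f12]
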